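-- pv_equiv track=rewrite | github.com/corridorofchameleons/leetcode | Hash Table/Medium/890. Find and Replace Pattern .py | farp
-- ===== SOURCE A (Python) =====
-- def farp(words, pattern):
--     def get_pat(s: str):
--         pat = {sym: [] for sym in s}
--         for i, sym in enumerate(s):
--             pat[sym].append(i)
--
--         return tuple(pat.values())
--
--     result = []
--
--     for word in words:
--         if get_pat(word) == get_pat(pattern):
--             result.append(word)
--
--     return result
-- ===== SOURCE B (Python) =====
-- def farp(words, pattern):
--     def encode(s):
--         labels = {}
--         out = []
--         for ch in s:
--             if ch not in labels:
--                 labels[ch] = len(labels)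
--             out.append(labels[ch])
--         return tuple(out)
--
--     pp = encode(pattern)
--     return [w for w in words if encode(w) == pp]
-- ===== Notes on version B (the rewrite author's own statement) =====
-- stated objective: faster
-- what changed: B canonicalizes each string by a first-occurrence label sequence ('abb' -> (0,1,1)) built in one dict pass, instead of A's tuple of per-character position lists, and encodes the pattern once before the loop instead of rebuilding A's pattern signature on every comparison.
import Mathlib
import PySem

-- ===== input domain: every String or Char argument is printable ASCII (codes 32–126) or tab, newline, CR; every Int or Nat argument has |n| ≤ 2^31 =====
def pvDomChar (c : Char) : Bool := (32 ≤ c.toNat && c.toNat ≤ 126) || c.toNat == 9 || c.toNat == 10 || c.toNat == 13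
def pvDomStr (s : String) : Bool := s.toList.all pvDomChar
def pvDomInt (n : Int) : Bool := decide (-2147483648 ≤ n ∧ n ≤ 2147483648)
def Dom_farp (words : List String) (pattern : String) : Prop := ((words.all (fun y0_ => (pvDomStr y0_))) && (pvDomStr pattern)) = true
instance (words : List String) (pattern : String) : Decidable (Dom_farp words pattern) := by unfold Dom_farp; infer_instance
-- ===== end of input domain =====

-- B canonicalizes each string by a first-occurrence label sequence ('abb' -> [0,1,1]) built in one
-- dict pass and encodes the pattern once, instead of A's tuple of per-character position lists
-- rebuilt for the pattern on every comparison (objective: faster; measured).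

-- ===== PORT A =====
def getPatA (s : List Char) : List (List Int) :=
  let pat0 := s.foldl (fun d c => d.insert c ([] : List Int)) PySem.Dict.empty
  let pat := (PySem.List.enumerate s).foldl
    (fun d p => d.modify p.2 [] (fun l => l ++ [p.1])) pat0
  pat.values

def farp (words : List String) (pattern : String) : List String :=
  words.foldl (fun result word =>
    if getPatA word.toList == getPatA pattern.toList then result ++ [word] else result) []

-- ===== PORT B =====
def encodeB (s : List Char) : List Int :=
  (s.foldl (fun (st : PySem.Dict Char Int × List Int) ch =>
      let labels := if st.1.contains ch then st.1 else st.1.insert ch (st.1.size : Int)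
      (labels, st.2 ++ [labels.getD ch 0])) (PySem.Dict.empty, [])).2

def farp_alt (words : List String) (pattern : String) : List String :=
  let pp := encodeB pattern.toList
  words.filter (fun w => encodeB w.toList == pp)

-- ===== PRECONDITION & SPEC =====
def Spec_farp (words : List String) (pattern : String) (out : List String) : Prop := out = farp_alt words pattern
instance (words : List String) (pattern : String) (out : List String) : Decidable (Spec_farp words pattern out) := by unfold Spec_farp; infer_instance

-- ===== CLAIM (what is proved, stated in full; the proofs are below) =====
def Claim_equal_farp : Prop := ∀ (words : List String) (pattern : String), Dom_farp words pattern → Spec_farp words pattern (farp words pattern)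

-- ===== LEMMAS AND PROOFS =====

-- positions (as Python ints) at which c occurs in s
def posOf {α : Type} [BEq α] (s : List α) (c : α) : List Int :=
  ((s.zipIdx).filter (fun p => p.1 == c)).map (fun p => (p.2 : Int))

-- A's canonical form: per first-occurring character, its list of positions
def canonPat {α : Type} [BEq α] (s : List α) : List (List Int) :=
  (PySem.Set.ofList s).map (fun c => posOf s c)

-- B's canonical form: each character replaced by its first-occurrence rank
def canonEnc {α : Type} [BEq α] (s : List α) : List Int :=
  s.map (fun c => ((PySem.Set.ofList s).idxOf c : Int))

-- reading B's canonical form off A's: position i is labelled by the group containing it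
def decode (g : List (List Int)) : List Int :=
  (List.range ((g.map List.length).sum)).map
    (fun (i : Nat) => ((g.findIdx (fun l => decide ((i : Int) ∈ l))) : Int))

-- the two dict states of A's get_pat, named so the lemmas can speak about them
def patDict0 (s : List Char) : PySem.Dict Char (List Int) :=
  s.foldl (fun d c => d.insert c ([] : List Int)) PySem.Dict.empty

def patDict (s : List Char) : PySem.Dict Char (List Int) :=
  (PySem.List.enumerate s).foldl (fun d p => d.modify p.2 [] (fun l => l ++ [p.1])) (patDict0 s)

theorem enum_eq_zipIdx {α : Type} (s : List α) (k : Nat) :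
    PySem.List.enumerate s (k : Int) = (s.zipIdx k).map (fun p => ((p.2 : Int), p.1)) := by
  induction s generalizing k with
  | nil => simp [PySem.List.enumerate_nil]
  | cons x xs ih =>
    rw [PySem.List.enumerate_cons, List.zipIdx_cons, List.map_cons]
    have : (k : Int) + 1 = ((k + 1 : Nat) : Int) := by push_cast; ring
    rw [this, ih]

theorem mem_posOf {α : Type} [BEq α] [LawfulBEq α] (s : List α) (c : α) (i : Nat) :
    ((i : Nat) : Int) ∈ posOf s c ↔ s[i]? = some c := by
  unfold posOf
  simp only [List.mem_map, List.mem_filter]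
  constructor
  · rintro ⟨⟨a, j⟩, ⟨hmem, hbeq⟩, hcast⟩
    have hj : j = i := by exact_mod_cast hcast
    subst hj
    have := List.mk_mem_zipIdx_iff_getElem?.mp hmem
    rw [this]; simp only [beq_iff_eq] at hbeq; rw [hbeq]
  · intro h
    exact ⟨(c, i), ⟨List.mk_mem_zipIdx_iff_getElem?.mpr h, by simp⟩, rfl⟩

theorem posOf_append_singleton {α : Type} [BEq α] [LawfulBEq α] (s : List α) (x c : α) :
    posOf (s ++ [x]) c = posOf s c ++ (if x == c then [(s.length : Int)] else []) := by
  unfold posOf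
  rw [show (s ++ [x]).zipIdx = s.zipIdx ++ [(x, s.length)] by simp [List.zipIdx_append]]
  rw [List.filter_append, List.map_append]
  congr 1
  by_cases h : x = c <;> simp [h]

theorem sum_ite_one_zero_nat {α : Type} (p : α → Bool) (L : List α) :
    (L.map (fun c => if p c then 1 else 0)).sum = L.countP p := by
  induction L with
  | nil => simp
  | cons a L ih => by_cases h : p a <;> simp [h, ih, Nat.add_comm]

theorem sumLen {α : Type} [BEq α] [LawfulBEq α] (s : List α) :
    ((PySem.Set.ofList s).map (fun c => (posOf s c).length)).sum = s.length := by
  induction s using List.reverseRecOn with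
  | nil => simp [PySem.Set.ofList_nil, posOf]
  | append_singleton t x ih =>
    rw [PySem.Set.ofList_append_singleton]
    by_cases hx : x ∈ PySem.Set.ofList t
    · rw [PySem.Set.add_of_mem hx]
      have hcong : (PySem.Set.ofList t).map (fun c => (posOf (t ++ [x]) c).length)
          = (PySem.Set.ofList t).map (fun c => (posOf t c).length + (if x == c then 1 else 0)) := by
        apply List.map_congr_left; intro a _
        rw [posOf_append_singleton]
        by_cases h : x = a <;> simp [h]
      rw [hcong, List.sum_map_add, ih, sum_ite_one_zero_nat]
      have : (PySem.Set.ofList t).countP (fun c => x == c) = 1 := by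
        have e : (PySem.Set.ofList t).countP (fun c => x == c) = (PySem.Set.ofList t).count x := by
          rw [List.count]; apply List.countP_congr; intro a _; rw [Bool.beq_comm (a := x) (b := a)]
        rw [e, List.count_eq_one_of_mem (PySem.Set.nodup_ofList t) hx]
      rw [this]; simp
    · rw [PySem.Set.add_of_not_mem hx, List.map_append, List.sum_append]
      have hcong : (PySem.Set.ofList t).map (fun c => (posOf (t ++ [x]) c).length)
          = (PySem.Set.ofList t).map (fun c => (posOf t c).length) := by
        apply List.map_congr_left; intro a ha
        rw [posOf_append_singleton]
        have : x ≠ a := fun h => hx (h ▸ ha)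
        simp [this]
      rw [hcong, ih]
      have hnil : posOf t x = [] := by
        unfold posOf
        rw [List.filter_eq_nil_iff.mpr, List.map_nil]
        rintro ⟨a, j⟩ hmem
        have := List.mk_mem_zipIdx_iff_getElem?.mp hmem
        simp only [beq_iff_eq]
        intro hc; subst hc
        exact hx (by rw [PySem.Set.mem_ofList]; exact List.mem_of_getElem? this)
      rw [List.map_cons]
      rw [posOf_append_singleton]
      simp [hnil]

theorem decode_canonPat {α : Type} [BEq α] [LawfulBEq α] (s : List α) :
    decode (canonPat s) = canonEnc s := by
  have hlen : ((canonPat s).map List.length).sum = s.length := by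
    unfold canonPat
    rw [List.map_map]
    exact sumLen s
  apply List.ext_getElem
  · simp [decode, hlen, canonEnc]
  · intro i hi hi2
    have hi' : i < s.length := by simpa [canonEnc] using hi2
    have hL : (decode (canonPat s))[i]
        = (((canonPat s).findIdx (fun l => decide ((i : Int) ∈ l))) : Int) := by
      unfold decode
      simp only [List.getElem_map, List.getElem_range]
    have hR : (canonEnc s)[i] = ((List.idxOf s[i] (PySem.Set.ofList s)) : Int) := by
      simp [canonEnc]
    rw [hL, hR]
    congr 1
    unfold canonPat
    rw [List.findIdx_map]
    have hpred : ((fun l => decide ((i : Int) ∈ l)) ∘ (fun c => posOf s c))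
        = (fun c => c == s[i]) := by
      funext c
      rw [Function.comp_apply, Bool.eq_iff_iff]
      simp only [decide_eq_true_eq, beq_iff_eq]
      rw [mem_posOf]
      simp [List.getElem?_eq_getElem hi', eq_comm]
    rw [hpred]
    rfl

theorem fo_map {α β : Type} [BEq α] [LawfulBEq α] [BEq β] [LawfulBEq β] (f : α → β) :
    ∀ (s : List α), (∀ a ∈ s, ∀ b ∈ s, f a = f b → a = b) →
    PySem.Set.ofList (s.map f) = (PySem.Set.ofList s).map f := by
  intro s
  induction s using List.reverseRecOn with
  | nil => simp [PySem.Set.ofList_nil]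
  | append_singleton t x ih =>
    intro hinj
    have hinj' : ∀ a ∈ t, ∀ b ∈ t, f a = f b → a = b := by
      intro a ha b hb
      exact hinj a (by simp [ha]) b (by simp [hb])
    rw [List.map_append, List.map_singleton, PySem.Set.ofList_append_singleton,
        PySem.Set.ofList_append_singleton, ih hinj']
    by_cases hx : x ∈ PySem.Set.ofList t
    · have hfx : f x ∈ (PySem.Set.ofList t).map f := List.mem_map_of_mem hx
      rw [PySem.Set.add_of_mem hx, PySem.Set.add_of_mem hfx]
    · have hfx : f x ∉ (PySem.Set.ofList t).map f := by
        intro hmem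
        obtain ⟨b, hb, hfb⟩ := List.mem_map.mp hmem
        have hbt : b ∈ t := (PySem.Set.mem_ofList t b).mp hb
        have : b = x := hinj b (by simp [hbt]) x (by simp) hfb
        exact hx (this ▸ hb)
      rw [PySem.Set.add_of_not_mem hx, PySem.Set.add_of_not_mem hfx, List.map_append,
          List.map_singleton]

theorem posOf_map {α β : Type} [BEq α] [LawfulBEq α] [BEq β] [LawfulBEq β] (f : α → β)
    (s : List α) (c : α) (hc : c ∈ s) (hinj : ∀ a ∈ s, ∀ b ∈ s, f a = f b → a = b) :
    posOf (s.map f) (f c) = posOf s c := by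
  unfold posOf
  rw [List.zipIdx_map, List.filter_map, List.map_map]
  congr 1
  apply List.filter_congr
  rintro ⟨a, j⟩ hmem
  have hgj := List.mk_mem_zipIdx_iff_getElem?.mp hmem
  have ha : a ∈ s := List.mem_of_getElem? hgj
  simp only [Function.comp, Prod.map]
  rw [Bool.eq_iff_iff]
  simp only [beq_iff_eq]
  exact ⟨fun h => hinj a ha c hc h, fun h => h ▸ rfl⟩

theorem canonPat_map_inj {α β : Type} [BEq α] [LawfulBEq α] [BEq β] [LawfulBEq β] (f : α → β)
    (s : List α) (hinj : ∀ a ∈ s, ∀ b ∈ s, f a = f b → a = b) :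
    canonPat (s.map f) = canonPat s := by
  unfold canonPat
  rw [fo_map f s hinj, List.map_map]
  apply List.map_congr_left
  intro c hc
  exact posOf_map f s c ((PySem.Set.mem_ofList s c).mp hc) hinj

theorem canonEnc_inj {α : Type} [BEq α] [LawfulBEq α] (s : List α) :
    ∀ a ∈ s, ∀ b ∈ s,
      ((PySem.Set.ofList s).idxOf a : Int) = ((PySem.Set.ofList s).idxOf b : Int) → a = b := by
  intro a ha b hb h
  have ha' : a ∈ PySem.Set.ofList s := (PySem.Set.mem_ofList s a).mpr ha
  have hb' : b ∈ PySem.Set.ofList s := (PySem.Set.mem_ofList s b).mpr hb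
  have hn : (PySem.Set.ofList s).idxOf a = (PySem.Set.ofList s).idxOf b := by exact_mod_cast h
  calc a = (PySem.Set.ofList s)[(PySem.Set.ofList s).idxOf a]'(List.idxOf_lt_length_of_mem ha') :=
        (List.getElem_idxOf _).symm
    _ = (PySem.Set.ofList s)[(PySem.Set.ofList s).idxOf b]'(List.idxOf_lt_length_of_mem hb') := by
        congr 1
    _ = b := List.getElem_idxOf _

theorem canon_iff (w p : List Char) : canonPat w = canonPat p ↔ canonEnc w = canonEnc p := by
  constructor
  · intro h
    rw [← decode_canonPat w, ← decode_canonPat p, h]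
  · intro h
    have hw : canonPat (canonEnc w) = canonPat w :=
      canonPat_map_inj _ w (canonEnc_inj w)
    have hp : canonPat (canonEnc p) = canonPat p :=
      canonPat_map_inj _ p (canonEnc_inj p)
    rw [← hw, ← hp, h]

theorem pat0_items (s : List Char) :
    (patDict0 s).items = (PySem.Set.ofList s).map (fun c => (c, ([] : List Int))) := by
  unfold patDict0
  induction s using List.reverseRecOn with
  | nil => simp [PySem.Set.ofList_nil, PySem.Dict.empty]
  | append_singleton t x ih =>
    rw [List.foldl_append, List.foldl_cons, List.foldl_nil]
    set d := t.foldl (fun d c => d.insert c ([] : List Int)) PySem.Dict.empty with hd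
    have hkeys : d.keys = PySem.Set.ofList t := by
      show d.items.map Prod.fst = _
      rw [ih, List.map_map,
          show (Prod.fst ∘ fun (c : Char) => (c, ([] : List Int))) = id from rfl, List.map_id]
    have hcont : d.contains x = decide (x ∈ PySem.Set.ofList t) := by
      rw [PySem.Dict.contains_eq_decide_mem_keys, hkeys]
    rw [PySem.Set.ofList_append_singleton]
    by_cases hx : x ∈ PySem.Set.ofList t
    · rw [PySem.Set.add_of_mem hx,
          PySem.Dict.items_insert_of_contains d _ (by rw [hcont]; exact decide_eq_true hx), ih,
          List.map_map]
      apply List.map_congr_left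
      intro a _
      by_cases hax : a = x
      · subst hax; simp
      · simp [Function.comp]
        intro h; exact absurd h hax
    · rw [PySem.Set.add_of_not_mem hx,
          PySem.Dict.items_insert_of_not_contains d _ (by rw [hcont]; exact decide_eq_false hx),
          ih, List.map_append, List.map_singleton]

theorem pat0_keys (s : List Char) : (patDict0 s).keys = PySem.Set.ofList s := by
  show (patDict0 s).items.map Prod.fst = _
  rw [pat0_items, List.map_map,
      show (Prod.fst ∘ fun (c : Char) => (c, ([] : List Int))) = id from rfl, List.map_id]

theorem pat0_getD (s : List Char) (c : Char) : (patDict0 s).getD c [] = [] := by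
  by_cases hc : c ∈ PySem.Set.ofList s
  · apply PySem.Dict.getD_of_mem_items (patDict0 s) _ (by
      rw [pat0_keys]; exact PySem.Set.nodup_ofList s)
    rw [pat0_items]
    exact List.mem_map_of_mem hc
  · apply PySem.Dict.getD_of_not_contains
    rw [PySem.Dict.contains_eq_decide_mem_keys, pat0_keys]
    exact decide_eq_false hc

theorem enum_swap (s : List Char) : (PySem.List.enumerate s).map Prod.swap
    = s.zipIdx.map (fun p => (p.1, (p.2 : Int))) := by
  have h := enum_eq_zipIdx s 0
  rw [show ((0 : Nat) : Int) = (0 : Int) from rfl] at h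
  rw [show PySem.List.enumerate s = PySem.List.enumerate s 0 from rfl, h, List.map_map]
  rfl

theorem patDict_eq_swapped (s : List Char) :
    patDict s = (s.zipIdx.map (fun p => (p.1, (p.2 : Int)))).foldl
      (fun d q => d.modify q.1 [] (fun l => l ++ [q.2])) (patDict0 s) := by
  unfold patDict
  rw [← enum_swap, List.foldl_map]
  rfl

theorem patDict_getD (s : List Char) (c : Char) : (patDict s).getD c [] = posOf s c := by
  rw [patDict_eq_swapped, PySem.Dict.getD_foldl_modify_append, pat0_getD, List.nil_append,
      List.filter_map, List.map_map]
  rfl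

theorem patDict_keys (s : List Char) : (patDict s).keys = PySem.Set.ofList s := by
  rw [patDict_eq_swapped]
  have hk := PySem.Dict.keys_foldl_modify_key
      (s.zipIdx.map (fun p => (p.1, (p.2 : Int)))) (fun (q : Char × Int) => q.1)
      ([] : List Int) (fun _ q => fun l => l ++ [q.2]) (patDict0 s)
  rw [hk, pat0_keys, List.map_map,
      show ((fun (q : Char × Int) => q.1) ∘ fun (p : Char × Nat) => (p.1, (p.2 : Int)))
        = Prod.fst from rfl,
      List.zipIdx_map_fst]
  rw [PySem.Set.update_eq_append_filter]
  rw [List.filter_eq_nil_iff.mpr, List.append_nil]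
  intro y hy
  simp only [Bool.not_eq_true', Bool.not_eq_false]
  rw [PySem.Set.contains_eq_listContains]
  exact List.elem_eq_true_of_mem hy

theorem getPatA_eq (s : List Char) : getPatA s = canonPat s := by
  show (patDict s).values = canonPat s
  rw [PySem.Dict.values_eq_map_keys (patDict s)
      (by rw [patDict_keys]; exact PySem.Set.nodup_ofList s) [], patDict_keys]
  unfold canonPat
  apply List.map_congr_left
  intro c _
  exact patDict_getD s c

theorem encode_inv (s : List Char) :
    (s.foldl (fun (st : PySem.Dict Char Int × List Int) ch =>
      let labels := if st.1.contains ch then st.1 else st.1.insert ch (st.1.size : Int)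
      (labels, st.2 ++ [labels.getD ch 0])) (PySem.Dict.empty, [])).1.items
        = (PySem.Set.ofList s).zipIdx.map (fun p => (p.1, (p.2 : Int)))
    ∧ (s.foldl (fun (st : PySem.Dict Char Int × List Int) ch =>
      let labels := if st.1.contains ch then st.1 else st.1.insert ch (st.1.size : Int)
      (labels, st.2 ++ [labels.getD ch 0])) (PySem.Dict.empty, [])).2 = canonEnc s := by
  induction s using List.reverseRecOn with
  | nil => constructor <;> simp [PySem.Set.ofList_nil, canonEnc, PySem.Dict.empty]
  | append_singleton t x ih =>
    obtain ⟨hitems, hout⟩ := ih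
    rw [List.foldl_append, List.foldl_cons, List.foldl_nil]
    set st := t.foldl (fun (st : PySem.Dict Char Int × List Int) ch =>
      let labels := if st.1.contains ch then st.1 else st.1.insert ch (st.1.size : Int)
      (labels, st.2 ++ [labels.getD ch 0])) (PySem.Dict.empty, []) with hst
    have hkeys : st.1.keys = PySem.Set.ofList t := by
      show st.1.items.map Prod.fst = _
      rw [hitems, List.map_map]
      exact List.zipIdx_map_fst 0 (PySem.Set.ofList t)
    have hnodup : st.1.keys.Nodup := by rw [hkeys]; exact PySem.Set.nodup_ofList t
    have hcont : st.1.contains x = decide (x ∈ PySem.Set.ofList t) := by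
      rw [PySem.Dict.contains_eq_decide_mem_keys, hkeys]
    by_cases hx : x ∈ PySem.Set.ofList t
    · have hc : st.1.contains x = true := by rw [hcont]; exact decide_eq_true hx
      simp only [hc, if_true]
      have hfo : PySem.Set.ofList (t ++ [x]) = PySem.Set.ofList t := by
        rw [PySem.Set.ofList_append_singleton, PySem.Set.add_of_mem hx]
      have hidx : st.1.getD x 0 = ((PySem.Set.ofList t).idxOf x : Int) := by
        apply PySem.Dict.getD_of_mem_items st.1 _ hnodup
        rw [hitems]
        have hmem : (x, List.idxOf x (PySem.Set.ofList t)) ∈ (PySem.Set.ofList t).zipIdx := by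
          rw [List.mk_mem_zipIdx_iff_getElem?,
              List.getElem?_eq_getElem (List.idxOf_lt_length_of_mem hx)]
          exact congrArg some (List.getElem_idxOf (List.idxOf_lt_length_of_mem hx))
        exact List.mem_map_of_mem (f := fun p => (p.1, (p.2 : Int))) hmem
      constructor
      · rw [hitems, hfo]
      · rw [hout, hidx, canonEnc, canonEnc, hfo, List.map_append, List.map_singleton]
    · have hc : st.1.contains x = false := by rw [hcont]; exact decide_eq_false hx
      simp only [hc, if_false, Bool.false_eq_true]
      have hxt : x ∉ t := fun h => hx ((PySem.Set.mem_ofList t x).mpr h)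
      have hfo : PySem.Set.ofList (t ++ [x]) = PySem.Set.ofList t ++ [x] := by
        rw [PySem.Set.ofList_append_singleton, PySem.Set.add_of_not_mem hx]
      have hsize : st.1.size = (PySem.Set.ofList t).length := by
        show st.1.items.length = _
        rw [hitems, List.length_map, List.length_zipIdx]
      constructor
      · rw [PySem.Dict.items_insert_of_not_contains st.1 _ hc, hitems, hfo]
        rw [show (PySem.Set.ofList t ++ [x]).zipIdx
              = (PySem.Set.ofList t).zipIdx ++ [(x, (PySem.Set.ofList t).length)] by
            simp [List.zipIdx_append]]
        rw [List.map_append, List.map_singleton, hsize]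
      · rw [hout, PySem.Dict.getD_insert_self, hsize, canonEnc, canonEnc, hfo,
            List.map_append, List.map_singleton]
        congr 1
        · apply List.map_congr_left
          intro a ha
          congr 1
          exact (List.idxOf_append_of_mem ((PySem.Set.mem_ofList t a).mpr ha)).symm
        · rw [List.idxOf_append_of_notMem hx, List.idxOf_cons_self]
          simp

theorem encodeB_eq (s : List Char) : encodeB s = canonEnc s := (encode_inv s).2

-- ===== VERDICT (by name: the statement is the Claim_ definition above) =====
theorem farp_spec : Claim_equal_farp := by
  intro words pattern _
  show farp words pattern = farp_alt words pattern
  unfold farp farp_alt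
  rw [show (fun (result : List String) word => if (getPatA word.toList == getPatA pattern.toList) = true then result ++ [word] else result)
        = (fun (result : List String) word => if (fun w => getPatA w.toList == getPatA pattern.toList) word = true then result ++ [id word] else result) from rfl,
      PySem.List.foldl_append_if]
  simp only [List.nil_append, List.map_id]
  apply List.filter_congr
  intro w _
  have h := canon_iff w.toList pattern.toList
  rw [← getPatA_eq, ← getPatA_eq, ← encodeB_eq, ← encodeB_eq] at h
  rw [Bool.eq_iff_iff]
  simpa only [beq_iff_eq] using h
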